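-- pv_equiv track=rewrite | github.com/bioconda/bioconda-recipes | recipes/xTea/xTea/x_polyA.py | _rotate_seq
-- ===== SOURCE A (Python) =====
-- def _rotate_seq(s_seq):
--     m_new={}
--     i_len=len(s_seq)
--     s_template=s_seq+s_seq
--     for i in range(i_len):
--         s_tmp=s_template[i:i+i_len]
--         m_new[s_tmp]=1
--     return m_new
-- ===== SOURCE B (Python) =====
-- def _rotate_seq(s_seq):
--     m_new = {}
--     cur = s_seq
--     for _ in range(len(s_seq)):
--         m_new[cur] = 1
--         cur = cur[1:] + cur[0]
--     return m_new
-- ===== Notes on version B (the rewrite author's own statement) =====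
-- stated objective: simpler
-- what changed: B maintains a running rotated string, rotating it by one character each iteration, instead of slicing a doubled template string at each index.
import Mathlib
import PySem

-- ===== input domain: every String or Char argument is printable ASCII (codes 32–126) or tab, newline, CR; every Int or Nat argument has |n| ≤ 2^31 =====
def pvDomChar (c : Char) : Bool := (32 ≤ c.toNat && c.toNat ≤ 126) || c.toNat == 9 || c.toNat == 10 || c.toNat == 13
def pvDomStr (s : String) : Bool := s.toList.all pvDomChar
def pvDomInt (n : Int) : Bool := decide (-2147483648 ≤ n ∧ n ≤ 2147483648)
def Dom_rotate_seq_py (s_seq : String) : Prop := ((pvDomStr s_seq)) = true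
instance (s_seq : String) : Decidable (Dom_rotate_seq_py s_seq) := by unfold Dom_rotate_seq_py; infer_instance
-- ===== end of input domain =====

-- B replaces A's doubled-template slicing with a running rotation updated one character per step ('simpler').

-- ===== PORT A =====
-- m_new[s_template[i:i+i_len]] = 1 for i in range(i_len); dict ported as PySem.Dict, returned as its items list.
def rotate_seq_py (s_seq : String) : List (String × Int) :=
  let i_len : Int := PySem.Str.len s_seq
  let s_template : List Char := s_seq.toList ++ s_seq.toList
  let m_new : PySem.Dict String Int :=
    (PySem.List.pyRange 0 i_len 1).foldl
      (fun m i =>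
        m.insert (String.ofList (PySem.List.slice s_template (some i) (some (i + i_len)))) 1)
      PySem.Dict.empty
  m_new.items

-- ===== PORT B =====
-- the loop 'for _ in range(len(s)): m[cur]=1; cur = cur[1:] + cur[0]' as structural recursion on the counter;
-- cur[1:] = tail, cur[0] appended = take 1 (the loop body only runs with cur nonempty, so take 1 is exactly [cur[0]]).
def rotateAuxB : Nat → List Char → PySem.Dict String Int → PySem.Dict String Int
  | 0, _, m => m
  | n + 1, cur, m => rotateAuxB n (cur.tail ++ cur.take 1) (m.insert (String.ofList cur) 1)

def rotate_seq_py_alt (s_seq : String) : List (String × Int) :=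
  (rotateAuxB s_seq.toList.length s_seq.toList PySem.Dict.empty).items

-- ===== PRECONDITION & SPEC =====
def Spec_rotate_seq_py (s_seq : String) (out : List (String × Int)) : Prop := out = rotate_seq_py_alt s_seq
instance (s_seq : String) (out : List (String × Int)) : Decidable (Spec_rotate_seq_py s_seq out) := by unfold Spec_rotate_seq_py; infer_instance

-- ===== CLAIM (what is proved, stated in full; the proofs are below) =====
def Claim_equal_rotate_seq_py : Prop := ∀ (s_seq : String), Dom_rotate_seq_py s_seq → Spec_rotate_seq_py s_seq (rotate_seq_py s_seq)

-- ===== LEMMAS AND PROOFS =====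

-- the slice A takes at index j is the rotation of s by j
lemma slice_double_eq_rot (s : List Char) (j : Nat) (hj : j ≤ s.length) :
    PySem.List.slice (s ++ s) (some (j : Int)) (some ((j : Int) + (s.length : Int))) =
      s.drop j ++ s.take j := by
  rw [PySem.List.slice_natCast_add]
  rw [List.drop_append_of_le_length hj]
  rw [List.take_append]
  rw [List.take_of_length_le (by simp), List.length_drop, Nat.sub_sub_self hj,
    List.take_eq_take_min, Nat.min_eq_left hj]

-- one step of B's running rotation advances the rotation index
lemma rot_step (s : List Char) (j : Nat) (hj : j < s.length) :
    (s.drop j ++ s.take j).tail ++ (s.drop j ++ s.take j).take 1 =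
      s.drop (j + 1) ++ s.take (j + 1) := by
  have hd : s.drop j = s[j] :: s.drop (j + 1) := List.drop_eq_getElem_cons hj
  have ht : s.take (j + 1) = s.take j ++ [s[j]] := by
    rw [List.take_add_one, List.getElem?_eq_getElem hj]; rfl
  rw [hd, ht, List.cons_append, List.tail_cons, List.take_cons Nat.one_pos]
  simp

-- the main invariant: A's fold over indices j..len equals B's recursion started at rotation j
lemma main_inv (s : List Char) (n j : Nat) (h : j + n = s.length) (m : PySem.Dict String Int) :
    (PySem.List.pyRange (j : Int) (s.length : Int) 1).foldl
      (fun m i =>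
        m.insert (String.ofList (PySem.List.slice (s ++ s) (some i) (some (i + (s.length : Int))))) 1)
      m = rotateAuxB n (s.drop j ++ s.take j) m := by
  induction n generalizing j m with
  | zero =>
    have : (j : Int) = (s.length : Int) := by omega
    rw [this, PySem.List.pyRange_one_eq_nil le_rfl]
    rfl
  | succ n ih =>
    have hj : j < s.length := by omega
    rw [PySem.List.pyRange_one_cons (by exact_mod_cast hj)]
    simp only [List.foldl_cons, rotateAuxB]
    rw [slice_double_eq_rot s j (le_of_lt hj), rot_step s j hj]
    have : ((j : Int) + 1) = ((j + 1 : Nat) : Int) := by omega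
    rw [this, ih (j + 1) (by omega)]

-- ===== VERDICT (by name: the statement is the Claim_ definition above) =====
theorem rotate_seq_py_spec : Claim_equal_rotate_seq_py := by
  intro s _
  unfold Spec_rotate_seq_py rotate_seq_py rotate_seq_py_alt
  simp only [PySem.Str.len_eq]
  have h := main_inv s.toList s.toList.length 0 (by omega) PySem.Dict.empty
  simp only [Nat.cast_zero, List.drop_zero, List.take_zero, List.append_nil] at h
  rw [h]
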